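-- pv_equiv track=rewrite | github.com/YuuuuBin2k5/TriTueNhanTao_UTE | Puzzle_Tuan1/ui.py | flat_to_matrix
-- ===== SOURCE A (Python) =====
-- def flat_to_matrix(flat, rows, cols):
--     """Convert flat list/iterable into matrix (list of lists) row-major."""
--     mat = []
--     for r in range(rows):
--         row = []
--         for c in range(cols):
--             idx = r*cols + c
--             if idx < len(flat):
--                 row.append(flat[idx])
--             else:
--                 row.append(None)
--         mat.append(row)
--     return mat
-- ===== SOURCE B (Python) =====
-- def flat_to_matrix(flat, rows, cols):
--     """Convert flat list/iterable into matrix (list of lists) row-major."""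
--     padded = list(flat) + [None] * (max(rows, 0) * cols - len(flat))
--     return [padded[r * cols:(r + 1) * cols] for r in range(rows)]
-- ===== Notes on version B (the rewrite author's own statement) =====
-- stated objective: simpler
-- what changed: Replaces the per-cell double loop with index/bounds test by a single pad-to-rows*cols step followed by slicing the padded list into rows.
-- outside the precondition, e.g. on flat_to_matrix([1, 2], 1, -1): A returns [[]], B returns [[1]]
import Mathlib
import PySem

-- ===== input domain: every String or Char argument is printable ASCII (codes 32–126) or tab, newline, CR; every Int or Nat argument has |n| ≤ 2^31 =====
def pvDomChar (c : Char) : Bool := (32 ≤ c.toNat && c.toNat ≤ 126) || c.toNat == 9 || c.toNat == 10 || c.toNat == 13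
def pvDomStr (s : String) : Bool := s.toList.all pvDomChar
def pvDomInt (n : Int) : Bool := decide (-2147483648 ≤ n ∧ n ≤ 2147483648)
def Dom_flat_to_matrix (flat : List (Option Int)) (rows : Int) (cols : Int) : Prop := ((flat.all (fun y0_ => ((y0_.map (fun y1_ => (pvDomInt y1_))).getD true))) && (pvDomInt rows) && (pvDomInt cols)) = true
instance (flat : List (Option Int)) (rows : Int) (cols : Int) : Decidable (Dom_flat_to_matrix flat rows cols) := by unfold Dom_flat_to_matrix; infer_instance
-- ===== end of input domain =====

-- B replaces A's per-cell double loop (index + bounds check) by pad-once-then-slice: simpler decomposition, same cost.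


-- ===== PORT A =====
-- literal port: outer loop over range(rows) appends rows; inner loop over range(cols) appends
-- flat[idx] when idx < len(flat) else None.  flat[idx]: whenever the branch runs idx is in
-- [0, len(flat)) (c ranges over range(cols) with cols > 0, so idx = r*cols+c ≥ 0), hence
-- pyGet? is some and the .getD none default is never taken — exact.
def flat_to_matrix (flat : List (Option Int)) (rows : Int) (cols : Int) : List (List (Option Int)) :=
  (PySem.List.pyRange 0 rows 1).foldl (fun mat r =>
    mat ++ [(PySem.List.pyRange 0 cols 1).foldl (fun row c =>
      let idx := r * cols + c
      if idx < (flat.length : Int) then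
        row ++ [(PySem.List.pyGet? flat idx).getD none]
      else
        row ++ [none]) []]) []

-- ===== PORT B =====
-- literal port of Source B: padded = list(flat) + [None]*(max(rows,0)*cols - len(flat))  ([None]*k
-- is [] for k ≤ 0, which Int.toNat matches), then rows by slicing padded[r*cols:(r+1)*cols].
def flat_to_matrix_alt (flat : List (Option Int)) (rows : Int) (cols : Int) : List (List (Option Int)) :=
  let padded := flat ++ List.replicate (max rows 0 * cols - (flat.length : Int)).toNat none
  (PySem.List.pyRange 0 rows 1).map (fun r =>
    PySem.List.slice padded (some (r * cols)) (some ((r + 1) * cols)))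

-- ===== PRECONDITION & SPEC =====
-- Pre_ excludes the nonsense shape cols < 0 with rows > 0 and len(flat) > -cols, where A's
-- rows of empty lists and B's negative-index slice leftovers are both accidental values no
-- caller would specify; all sensible inputs (cols ≥ 0) are admitted.
def Pre_flat_to_matrix (flat : List (Option Int)) (rows : Int) (cols : Int) : Prop :=
  0 ≤ cols ∨ rows ≤ 0 ∨ (flat.length : Int) ≤ -cols
instance (flat : List (Option Int)) (rows : Int) (cols : Int) : Decidable (Pre_flat_to_matrix flat rows cols) := by unfold Pre_flat_to_matrix; infer_instance
def pvWitness_flat_to_matrix : List (Option Int) × Int × Int := ([some 1, none, some 3], 2, 2)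

def Spec_flat_to_matrix (flat : List (Option Int)) (rows : Int) (cols : Int) (out : List (List (Option Int))) : Prop := out = flat_to_matrix_alt flat rows cols
instance (flat : List (Option Int)) (rows : Int) (cols : Int) (out : List (List (Option Int))) : Decidable (Spec_flat_to_matrix flat rows cols out) := by unfold Spec_flat_to_matrix; infer_instance

-- ===== CLAIM (what is proved, stated in full; the proofs are below) =====
def Claim_equal_flat_to_matrix : Prop := ∀ (flat : List (Option Int)) (rows : Int) (cols : Int), Dom_flat_to_matrix flat rows cols → Pre_flat_to_matrix flat rows cols → Spec_flat_to_matrix flat rows cols (flat_to_matrix flat rows cols)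

-- ===== LEMMAS AND PROOFS =====

-- A's inner loop builds the r-th row as a map over the column range.
lemma rowA_eq_map (flat : List (Option Int)) (r cols : Int) :
    (PySem.List.pyRange 0 cols 1).foldl (fun row c =>
      let idx := r * cols + c
      if idx < (flat.length : Int) then
        row ++ [(PySem.List.pyGet? flat idx).getD none]
      else
        row ++ [none]) []
    = (PySem.List.pyRange 0 cols 1).map (fun c =>
        if r * cols + c < (flat.length : Int) then
          (PySem.List.pyGet? flat (r * cols + c)).getD none
        else none) := by
  have hfun : (fun (row : List (Option Int)) (c : Int) =>
      let idx := r * cols + c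
      if idx < (flat.length : Int) then
        row ++ [(PySem.List.pyGet? flat idx).getD none]
      else
        row ++ [none])
      = (fun (row : List (Option Int)) (c : Int) =>
          row ++ [if r * cols + c < (flat.length : Int) then
                    (PySem.List.pyGet? flat (r * cols + c)).getD none
                  else none]) := by
    funext row c
    by_cases h : r * cols + c < (flat.length : Int) <;> simp [h]
  rw [hfun, PySem.List.foldl_append_singleton_eq_map]
  simp

-- ===== VERDICT =====
theorem flat_to_matrix_spec : Claim_equal_flat_to_matrix := by
  intro flat rows cols _ hpre
  unfold Spec_flat_to_matrix flat_to_matrix flat_to_matrix_alt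
  rw [PySem.List.foldl_append_singleton_eq_map]
  simp only [List.nil_append]
  apply List.map_congr_left
  intro r hr
  rw [PySem.List.mem_pyRange_one] at hr
  obtain ⟨hr0, hrlt⟩ := hr
  rw [rowA_eq_map]
  have hmax : max rows 0 = rows := max_eq_left (by omega)
  rw [hmax]
  by_cases hc : 0 < cols
  · -- cols > 0: the slice is an in-range chunk of cols elements
    have hj : (0:Int) ≤ r * cols := mul_nonneg hr0 (le_of_lt hc)
    have hj' : (0:Int) ≤ (r + 1) * cols := by nlinarith
    have hmul : (r + 1) * cols ≤ rows * cols := by nlinarith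
    rw [PySem.List.slice_toNat _ hj hj', PySem.List.pyRange_one]
    simp only [List.map_map, Int.sub_zero]
    apply List.ext_getElem
    · simp only [List.length_map, List.length_range, List.length_take, List.length_drop,
        List.length_append, List.length_replicate]
      have hsum : (r + 1) * cols = r * cols + cols := by ring
      omega
    · intro k h1 h2
      simp only [List.length_map, List.length_range] at h1
      simp only [List.getElem_map, List.getElem_range, Function.comp_apply]
      rw [List.getElem_take, List.getElem_drop]
      have hcast : ((r * cols).toNat : Int) = r * cols := Int.toNat_of_nonneg hj
      by_cases hin : (r * cols).toNat + k < flat.length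
      · have hcond : r * cols + (0 + (k : Int)) < (flat.length : Int) := by omega
        rw [if_pos hcond, List.getElem_append_left hin]
        have : r * cols + (0 + (k : Int)) = (((r * cols).toNat + k : Nat) : Int) := by omega
        rw [this, PySem.List.pyGet?_natCast]
        simp [hin]
      · have hcond : ¬ r * cols + (0 + (k : Int)) < (flat.length : Int) := by omega
        rw [if_neg hcond]
        rw [List.getElem_append_right (by omega)]
        simp
  · -- cols ≤ 0: A's inner range is empty and the slice is empty
    push Not at hc
    rw [PySem.List.pyRange_one_eq_nil hc, List.map_nil]
    symm
    apply List.eq_nil_of_length_eq_zero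
    rw [PySem.List.length_slice]
    rcases lt_or_eq_of_le hc with hlt | heq
    · -- cols < 0: Pre_ gives len(flat) ≤ -cols, so the clamped stop is 0
      have hlen : (flat.length : Int) ≤ -cols := by
        rcases hpre with h | h | h
        · omega
        · omega
        · exact h
      have hpad : (rows * cols - (flat.length : Int)).toNat = 0 := by
        have : rows * cols ≤ cols := by nlinarith
        omega
      have hstop : (r + 1) * cols ≤ cols := by nlinarith
      simp only [hpad, List.replicate_zero, List.append_nil, PySem.List.clampIdx]
      split_ifs <;> omega
    · subst heq
      simp
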